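-- pv_equiv track=rewrite | github.com/darius/sketchbook | misc/macroe.py | collect_call
-- ===== SOURCE A (Python) =====
-- def collect_call(chars):
--     parts, part = [], ''
--     for ch in chars:
--         if ch == ',':
--             parts.append(part)
--             part = ''
--         elif ch == '}':
--             if part: parts.append(part)
--             return parts
--         else:
--             part += ch
--     raise Exception("Missing '}'", parts, part)
-- ===== SOURCE B (Python) =====
-- def collect_call(chars):
--     head, brace, _ = chars.partition('}')
--     if not brace:
--         raise Exception("Missing '}'")
--     parts = head.split(',')
--     if parts[-1] == '':
--         parts.pop()
--     return parts
-- ===== Notes on version B (the rewrite author's own statement) =====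
-- stated objective: idiomatic
-- what changed: Replaces A's character-by-character branch-per-char accumulation loop with a collect-then-split decomposition: partition at the first closing brace, split the head on commas, and drop one trailing empty piece.
import Mathlib
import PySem

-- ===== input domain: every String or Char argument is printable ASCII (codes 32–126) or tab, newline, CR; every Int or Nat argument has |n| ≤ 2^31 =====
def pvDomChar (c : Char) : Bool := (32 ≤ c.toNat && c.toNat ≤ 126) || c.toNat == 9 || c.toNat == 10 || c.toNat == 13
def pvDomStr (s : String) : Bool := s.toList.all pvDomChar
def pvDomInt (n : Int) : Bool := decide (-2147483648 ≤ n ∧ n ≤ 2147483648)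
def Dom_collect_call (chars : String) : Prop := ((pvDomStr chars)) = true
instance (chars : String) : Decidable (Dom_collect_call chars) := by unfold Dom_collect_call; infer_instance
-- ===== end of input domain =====

-- B replaces A's per-character accumulation loop with a partition-at-the-closing-brace then split-on-commas decomposition;
-- equivalence of RETURN values is claimed on Pre_ (a closing brace present); both Pythons raise otherwise.

-- ===== PORT A =====
-- literal transliteration of A's for-loop; the final `raise` branch is unreachable under Pre_
-- (we return the accumulated parts there, a dead value).
def collectLoopA (l : List Char) (parts : List (List Char)) (part : List Char) : List (List Char) :=
  match l with
  | [] => parts  -- A raises here; excluded by Pre_collect_call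
  | ch :: rest =>
    if ch = ',' then collectLoopA rest (parts ++ [part]) []
    else if ch = '}' then (if part ≠ [] then parts ++ [part] else parts)
    else collectLoopA rest parts (part ++ [ch])

def collect_call (chars : String) : List String :=
  (collectLoopA chars.toList [] []).map String.ofList

-- ===== PORT B =====
def collect_call_alt (chars : String) : List String :=
  let head := chars.toList.takeWhile (· ≠ '}')      -- chars.partition('}')[0]
  let parts := PySem.Chars.splitOn head [',']       -- head.split(',')
  let parts := if parts.getLast! = [] then parts.dropLast else parts
  parts.map String.ofList

-- ===== PRECONDITION & SPEC =====
-- Pre_ excludes exactly the inputs with no closing brace, on which the Python A raises an Exception (and B raises too).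
def Pre_collect_call (chars : String) : Prop := '}' ∈ chars.toList
instance (chars : String) : Decidable (Pre_collect_call chars) := by unfold Pre_collect_call; infer_instance
def pvWitness_collect_call : String := "a,b}"
def Spec_collect_call (chars : String) (out : List String) : Prop := out = collect_call_alt chars
instance (chars : String) (out : List String) : Decidable (Spec_collect_call chars out) := by unfold Spec_collect_call; infer_instance

-- ===== CLAIM (what is proved, stated in full; the proofs are below) =====
def Claim_equal_collect_call : Prop := ∀ (chars : String), Dom_collect_call chars → Pre_collect_call chars → Spec_collect_call chars (collect_call chars)

-- ===== LEMMAS AND PROOFS =====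

-- comma-segments of `l`, with `pre` the accumulated current piece (spec form of str.split(','))
def segs (pre : List Char) : List Char → List (List Char)
  | [] => [pre]
  | c :: rest => if c = ',' then pre :: segs [] rest else segs (pre ++ [c]) rest

theorem segs_ne_nil (pre l : List Char) : segs pre l ≠ [] := by
  cases l with
  | nil => simp [segs]
  | cons c rest =>
    by_cases h : c = ','
    · simp [segs, h]
    · simp only [segs, if_neg h]; exact segs_ne_nil _ _

theorem go_eq_segs (fuel : Nat) (l cur : List Char) (acc : List (List Char))
    (h : l.length < fuel) :
    PySem.Chars.splitOn.go [','] fuel l cur acc = acc.reverse ++ segs cur.reverse l := by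
  induction fuel generalizing l cur acc with
  | zero => omega
  | succ n ih =>
    cases l with
    | nil => simp [PySem.Chars.splitOn.go, segs]
    | cons c rest =>
      by_cases hc : c = ','
      · subst hc
        simp only [PySem.Chars.splitOn.go]
        rw [if_pos (by simp [List.isPrefixOf])]
        simp only [List.length_cons] at h
        rw [ih _ _ _ (by simpa using Nat.lt_of_succ_lt_succ h)]
        simp [segs]
      · simp only [PySem.Chars.splitOn.go]
        rw [if_neg (by simp [List.isPrefixOf]; exact fun e => hc e.symm)]
        simp only [List.length_cons] at h
        rw [ih _ _ _ (Nat.lt_of_succ_lt_succ h)]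
        simp [segs, hc]

theorem splitOn_eq_segs (l : List Char) :
    PySem.Chars.splitOn l [','] = segs [] l := by
  unfold PySem.Chars.splitOn
  simpa using go_eq_segs (l.length + 1) l [] [] (by omega)

-- the result shape B computes, from accumulated state (part, remaining head)
def finish (part head : List Char) : List (List Char) :=
  if (segs part head).getLast! = [] then (segs part head).dropLast else segs part head

theorem getLast!_cons_ne_nil (a : List Char) (ps : List (List Char)) (h : ps ≠ []) :
    (a :: ps).getLast! = ps.getLast! := by
  cases ps with
  | nil => exact absurd rfl h
  | cons b t => simp [List.getLast!]

theorem finish_cons_comma (part rest : List Char) :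
    finish part (',' :: rest) = part :: finish [] rest := by
  unfold finish
  rw [show segs part (',' :: rest) = part :: segs [] rest from by simp [segs]]
  rw [getLast!_cons_ne_nil part _ (segs_ne_nil [] rest)]
  by_cases he : (segs [] rest).getLast! = []
  · rw [if_pos he, if_pos he, List.dropLast_cons_of_ne_nil (segs_ne_nil [] rest)]
  · rw [if_neg he, if_neg he]

theorem loopA_eq (l : List Char) (parts : List (List Char)) (part : List Char)
    (h : '}' ∈ l) :
    collectLoopA l parts part = parts ++ finish part (l.takeWhile (· ≠ '}')) := by
  induction l generalizing parts part with
  | nil => simp at h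
  | cons c rest ih =>
    by_cases hc : c = ','
    · subst hc
      rw [show collectLoopA (',' :: rest) parts part = collectLoopA rest (parts ++ [part]) [] from rfl]
      have hm : '}' ∈ rest := by simpa using h
      rw [ih _ _ hm]
      rw [List.takeWhile_cons_of_pos (by decide), finish_cons_comma]
      simp
    · by_cases hb : c = '}'
      · subst hb
        rw [show collectLoopA ('}' :: rest) parts part
              = (if part ≠ [] then parts ++ [part] else parts) from rfl]
        rw [List.takeWhile_cons_of_neg (by simp)]
        unfold finish
        simp only [segs]
        by_cases hp : part = []
        · simp [hp, List.getLast!]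
        · simp [hp, List.getLast!]
      · rw [show collectLoopA (c :: rest) parts part
              = collectLoopA rest parts (part ++ [c]) from by
            simp [collectLoopA, hc, hb]]
        have hm : '}' ∈ rest := by
          rcases List.mem_cons.mp h with h1 | h1
          · exact absurd h1.symm hb
          · exact h1
        rw [ih _ _ hm]
        rw [List.takeWhile_cons_of_pos (by simpa using hb)]
        unfold finish
        simp [segs, hc]

theorem collect_call_spec : Claim_equal_collect_call := by
  intro chars _ hpre
  unfold Spec_collect_call collect_call
  rw [loopA_eq chars.toList [] [] hpre]
  simp [collect_call_alt, finish, splitOn_eq_segs]
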